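-- pv_equiv track=rewrite | github.com/asimao1777/Finance-Controlling | Data Science/N1_2D Lists/N1-part0-Ex7.py | count_word_lengths
-- ===== SOURCE A (Python) =====
-- def count_word_lengths(s):
--     assert all([x.isalpha() or x == " " for x in s])
--     assert type(s) is str
--
--     x = s.split(" ")
--     final = []
--     final_num = []
--     count = 0
--     for i in x:
--         if i != "":
--             final.append(i)
--
--     for t in range(len(final)):
--         for w in final[t]:
--             count += 1
--         final_num.append(count)
--         count = 0
--
--     return final_num
-- ===== SOURCE B (Python) =====
-- def count_word_lengths(s):
--     assert all([x.isalpha() or x == " " for x in s])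
--     assert type(s) is str
--
--     result = []
--     count = 0
--     for ch in s:
--         if ch == " ":
--             if count > 0:
--                 result.append(count)
--                 count = 0
--         else:
--             count += 1
--     if count > 0:
--         result.append(count)
--     return result
-- ===== Notes on version B (the rewrite author's own statement) =====
-- stated objective: alternative
-- what changed: Replaces split(' ')/filter-empty plus a nested per-word counting loop with one character-by-character scan that maintains a run-length counter and flushes it at each space boundary and at the end.
import Mathlib
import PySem

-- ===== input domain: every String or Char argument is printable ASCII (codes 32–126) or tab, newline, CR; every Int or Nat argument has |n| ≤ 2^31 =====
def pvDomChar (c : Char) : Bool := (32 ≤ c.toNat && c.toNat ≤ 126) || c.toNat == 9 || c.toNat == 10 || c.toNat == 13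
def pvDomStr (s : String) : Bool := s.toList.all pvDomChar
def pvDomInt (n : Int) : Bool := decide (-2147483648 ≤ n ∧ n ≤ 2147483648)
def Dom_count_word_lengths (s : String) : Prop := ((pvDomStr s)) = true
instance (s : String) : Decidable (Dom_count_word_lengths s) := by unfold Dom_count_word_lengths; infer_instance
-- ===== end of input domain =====

-- B replaces split(" ")/filter-empty plus a nested per-word counting loop with one
-- character scan keeping a run-length counter (alternative decomposition, same cost).

-- ===== PORT A =====
-- inner loop 'for w in final[t]: count += 1' of A
def pvA_countChars (w : List Char) : Int :=
  w.foldl (fun count _ => count + 1) 0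

def count_word_lengths (s : String) : List Int :=
  let x : List String := (PySem.Str.split? s " ").getD []
  let final : List String :=
    x.foldl (fun final i => if i ≠ "" then final ++ [i] else final) []
  let final_num : List Int :=
    (PySem.List.pyRange 0 (PySem.List.len final) 1).foldl
      (fun final_num t => final_num ++ [pvA_countChars (PySem.List.pyGetD final t "").toList]) []
  final_num

-- ===== PORT B =====
-- the character scan of Source B: acc = result list so far, count = current run length
def pvB_go : List Char → List Int → Int → List Int
  | [], acc, count => if count > 0 then acc ++ [count] else acc
  | c :: rest, acc, count =>
    if c == ' ' then
      if count > 0 then pvB_go rest (acc ++ [count]) 0 else pvB_go rest acc 0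
    else pvB_go rest acc (count + 1)

def count_word_lengths_alt (s : String) : List Int := pvB_go s.toList [] 0

-- ===== PRECONDITION & SPEC =====
-- A's first assert raises AssertionError unless every character is alphabetic or a space.
def Pre_count_word_lengths (s : String) : Prop :=
  (s.toList.all (fun c => PySem.Chars.isalpha c || c == ' ')) = true
instance (s : String) : Decidable (Pre_count_word_lengths s) := by
  unfold Pre_count_word_lengths; infer_instance

def pvWitness_count_word_lengths : String := "ab c"

def Spec_count_word_lengths (s : String) (out : List Int) : Prop := out = count_word_lengths_alt s
instance (s : String) (out : List Int) : Decidable (Spec_count_word_lengths s out) := by unfold Spec_count_word_lengths; infer_instance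

-- ===== CLAIM (what is proved, stated in full; the proofs are below) =====
def Claim_equal_count_word_lengths : Prop := ∀ (s : String), Dom_count_word_lengths s → Pre_count_word_lengths s → Spec_count_word_lengths s (count_word_lengths s)

-- ===== LEMMAS AND PROOFS =====

-- reference splitter: pvSplitSp pre l = the pieces of (pre ++ l) split at each space of l
def pvSplitSp : List Char → List Char → List (List Char)
  | pre, [] => [pre]
  | pre, c :: rest => if c = ' ' then pre :: pvSplitSp [] rest else pvSplitSp (pre ++ [c]) rest

theorem pv_go_eq (l : List Char) : ∀ (fuel : Nat) (cur : List Char) (acc : List (List Char)),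
    l.length < fuel →
    PySem.Chars.splitOn.go [' '] fuel l cur acc = acc.reverse ++ pvSplitSp cur.reverse l := by
  induction l with
  | nil =>
    intro fuel cur acc h
    cases fuel with
    | zero => omega
    | succ f => simp [PySem.Chars.splitOn.go, pvSplitSp]
  | cons c rest ih =>
    intro fuel cur acc h
    cases fuel with
    | zero => simp at h
    | succ f =>
      rw [PySem.Chars.splitOn.go]
      by_cases hc : c = ' '
      · subst hc
        simp only [List.isPrefixOf, BEq.rfl, Bool.true_and, if_pos]
        rw [List.length_singleton, List.drop_one, List.tail_cons,
          ih f [] (cur.reverse :: acc) (by simpa using h)]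
        simp [pvSplitSp]
      · have : ([' '].isPrefixOf (c :: rest)) = false := by
          simp [List.isPrefixOf]
          exact fun hh => absurd hh.symm hc
        rw [this]
        simp only [Bool.false_eq_true, if_false]
        rw [ih f (c :: cur) acc (by simpa using h)]
        simp [pvSplitSp, hc]

theorem pv_splitOn_eq (cs : List Char) :
    PySem.Chars.splitOn cs [' '] = pvSplitSp [] cs := by
  unfold PySem.Chars.splitOn
  rw [pv_go_eq cs (cs.length + 1) [] [] (by omega)]
  simp

theorem pvB_go_eq (l : List Char) : ∀ (pre : List Char) (acc : List Int),
    pvB_go l acc (pre.length : Int) =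
      acc ++ ((pvSplitSp pre l).filter (fun w => w ≠ [])).map (fun w => (w.length : Int)) := by
  induction l with
  | nil =>
    intro pre acc
    by_cases hp : pre = []
    · subst hp; simp [pvB_go, pvSplitSp]
    · have hlen : (0 : Int) < (pre.length : Int) := by
        have : 0 < pre.length := List.length_pos_of_ne_nil hp
        exact_mod_cast this
      simp [pvB_go, pvSplitSp, hp]
  | cons c rest ih =>
    intro pre acc
    by_cases hc : c = ' '
    · subst hc
      by_cases hp : pre = []
      · subst hp
        have h0 : ((([] : List Char)).length : Int) = 0 := by simp
        simp only [pvB_go, BEq.rfl, if_pos, List.length_nil, Nat.cast_zero, lt_irrefl, if_false]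
        rw [show (0 : Int) = ((([] : List Char)).length : Int) by simp, ih [] acc]
        simp [pvSplitSp]
      · have hlen : (0 : Int) < (pre.length : Int) := by
          have : 0 < pre.length := List.length_pos_of_ne_nil hp
          exact_mod_cast this
        simp only [pvB_go, BEq.rfl, if_pos, hlen]
        rw [show (0 : Int) = ((([] : List Char)).length : Int) by simp, ih [] (acc ++ [(pre.length : Int)])]
        simp [pvSplitSp, hp]
    · have hbe : (c == ' ') = false := by simp [hc]
      simp only [pvB_go, hbe, Bool.false_eq_true, if_false]
      rw [show ((pre.length : Int) + 1) = (((pre ++ [c]).length : Int)) by simp, ih (pre ++ [c]) acc]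
      simp [pvSplitSp, hc]

theorem pv_countChars_eq (w : List Char) : pvA_countChars w = (w.length : Int) := by
  unfold pvA_countChars
  have h : ∀ (l : List Char) (n : Int), l.foldl (fun count _ => count + 1) n = n + l.length := by
    intro l
    induction l with
    | nil => intro n; simp
    | cons a t iht => intro n; simp [List.foldl, iht]; ring
  simpa using h w 0

theorem pv_ne_empty_iff (i : String) : (i ≠ "") ↔ (i.toList ≠ []) := by
  constructor
  · intro h hl
    apply h
    have : i.toList = ("" : String).toList := by simpa using hl
    exact String.toList_inj.mp this
  · intro h he
    subst he
    simp at h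

theorem pv_main (s : String) : count_word_lengths s = count_word_lengths_alt s := by
  unfold count_word_lengths count_word_lengths_alt
  have hbridge := PySem.Str.split?_map s " "
  have hsep : (" " : String).toList = [' '] := rfl
  rw [hsep] at hbridge
  obtain ⟨xs, hxs, hmap⟩ :
      ∃ xs, PySem.Str.split? s " " = some xs ∧
        xs.map String.toList = PySem.Chars.splitOn s.toList [' '] := by
    cases hx : PySem.Str.split? s " " with
    | none => rw [hx] at hbridge; simp [PySem.Chars.split?] at hbridge
    | some xs =>
      refine ⟨xs, rfl, ?_⟩
      rw [hx] at hbridge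
      simpa [PySem.Chars.split?] using hbridge
  rw [hxs]
  simp only [Option.getD_some]
  rw [PySem.List.foldl_append_ite_eq_filter]
  simp only [List.nil_append]
  have hlen : PySem.List.len (xs.filter (fun i => decide (i ≠ ""))) =
      ((xs.filter (fun i => decide (i ≠ ""))).length : Int) := by
    simp [PySem.List.len]
  rw [hlen]
  have h2 := PySem.List.foldl_pyRange_pyGetD' (xs.filter (fun i => decide (i ≠ "")))
    "" (fun fn w => fn ++ [pvA_countChars w.toList]) [] (a := 0) (by omega)
  simp only [] at h2
  rw [h2]
  simp only [Int.toNat_zero, List.drop_zero]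
  rw [PySem.List.foldl_append_singleton_eq_map]
  simp only [List.nil_append]
  have hpred : (fun i : String => decide (i ≠ "")) =
      ((fun w : List Char => decide (w ≠ [])) ∘ String.toList) := by
    funext i
    exact decide_eq_decide.mpr (pv_ne_empty_iff i)
  have hfun : (fun w : String => pvA_countChars w.toList) =
      ((fun w : List Char => (w.length : Int)) ∘ String.toList) := by
    funext w
    exact pv_countChars_eq w.toList
  have hfil : (xs.filter (fun i => decide (i ≠ ""))).map (fun w => pvA_countChars w.toList) =
      ((xs.map String.toList).filter (fun w => decide (w ≠ []))).map (fun w => (w.length : Int)) := by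
    rw [List.filter_map, List.map_map, hpred, hfun]
  rw [hfil, hmap, pv_splitOn_eq]
  rw [show (0 : Int) = ((([] : List Char)).length : Int) by simp, pvB_go_eq s.toList [] []]
  simp

-- ===== VERDICT (by name: the statement is the Claim_ definition above) =====
theorem count_word_lengths_spec : Claim_equal_count_word_lengths := by
  intro s _ _
  unfold Spec_count_word_lengths
  exact pv_main s
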